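-- pv_equiv track=rewrite | github.com/MichelleZ/leetcode | algorithms/python/smallestRotationwithHighestScore/smallestRotationwithHighestScore.py | bestRotation
-- ===== SOURCE A (Python) =====
-- from typing import List
--
-- def bestRotation(A: List[int]) -> int:
--     n = len(A)
--     change = [0] * n
--     for i in range(n):
--         change[(i - A[i] + 1 + n) % n] -= 1
--     for i in range(1, n):
--         change[i] += change[i - 1] + 1
--     return change.index(max(change))
-- ===== SOURCE B (Python) =====
-- from typing import List
--
-- def bestRotation(A: List[int]) -> int:
--     n = len(A)
--     pts = sorted((i - A[i] + 1) % n for i in range(n))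
--     scores = []
--     ptr = 0
--     for k in range(n):
--         while ptr < n and pts[ptr] <= k:
--             ptr += 1
--         scores.append(k - ptr)
--     return scores.index(max(scores))
-- ===== Notes on version B (the rewrite author's own statement) =====
-- stated objective: alternative
-- what changed: Replaces the in-place difference-array + prefix-sum sweep with sorting each element's cutoff point (i - A[i] + 1) % n and a two-pointer scan that counts points <= k per rotation k, then scores.index(max(scores))
import Mathlib
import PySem

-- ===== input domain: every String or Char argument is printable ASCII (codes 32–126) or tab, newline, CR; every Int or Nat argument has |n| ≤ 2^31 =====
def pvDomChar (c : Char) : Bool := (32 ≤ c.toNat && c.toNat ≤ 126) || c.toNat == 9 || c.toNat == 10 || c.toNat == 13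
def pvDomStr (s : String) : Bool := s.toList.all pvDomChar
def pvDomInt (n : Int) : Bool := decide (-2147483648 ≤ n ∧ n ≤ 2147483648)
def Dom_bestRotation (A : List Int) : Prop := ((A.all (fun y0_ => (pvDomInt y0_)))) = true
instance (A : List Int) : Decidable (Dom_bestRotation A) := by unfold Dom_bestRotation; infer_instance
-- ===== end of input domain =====

-- B replaces A's in-place difference-array + prefix-sum sweep by sorting the cutoff points and a two-pointer scan that counts points <= k for each rotation k (alternative algorithm, similar cost).

-- ===== PORT A =====
def bestRotation (A : List Int) : Int :=
  let n : Nat := A.length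
  let change : List Int :=
    (PySem.List.pyRange 0 (n : Int) 1).foldl
      (fun ch i =>
        PySem.List.pySetD ch (PySem.Int.mod (i - PySem.List.pyGetD A i 0 + 1 + (n : Int)) (n : Int))
          (PySem.List.pyGetD ch (PySem.Int.mod (i - PySem.List.pyGetD A i 0 + 1 + (n : Int)) (n : Int)) 0 - 1))
      (List.replicate n 0)
  let change2 : List Int :=
    (PySem.List.pyRange 1 (n : Int) 1).foldl
      (fun ch i =>
        PySem.List.pySetD ch i (PySem.List.pyGetD ch i 0 + (PySem.List.pyGetD ch (i - 1) 0 + 1)))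
      change
  match PySem.List.max? change2 (fun x => x) with
  | none => 0           -- unreachable under Pre_ (max() of an empty list raises in Python)
  | some m =>
    match PySem.List.index? change2 m with
    | some j => (j : Int)
    | none => 0

-- ===== PORT B =====
-- port of the while-loop 'while ptr < n and pts[ptr] <= k: ptr += 1'
def advancePtr (pts : List Int) (k : Int) (ptr : Nat) : Nat :=
  if h : ptr < pts.length then
    if pts[ptr] ≤ k then advancePtr pts k (ptr + 1) else ptr
  else ptr
termination_by pts.length - ptr

def bestRotation_alt (A : List Int) : Int :=
  let n : Nat := A.length
  let pts : List Int :=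
    PySem.List.sorted
      ((PySem.List.pyRange 0 (n : Int) 1).map
        (fun i => PySem.Int.mod (i - PySem.List.pyGetD A i 0 + 1) (n : Int)))
      (fun x => x) false
  let sp : List Int × Nat :=
    (PySem.List.pyRange 0 (n : Int) 1).foldl
      (fun st k =>
        let ptr' := advancePtr pts k st.2
        (st.1 ++ [k - (ptr' : Int)], ptr'))
      ([], 0)
  match PySem.List.max? sp.1 (fun x => x) with
  | none => 0           -- unreachable under Pre_ (max() of an empty list raises in Python)
  | some m =>
    match PySem.List.index? sp.1 m with
    | some j => (j : Int)
    | none => 0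

-- ===== PRECONDITION & SPEC =====
-- Pre_ excludes only the empty list, on which both Pythons raise ValueError (max() of empty sequence).
def Pre_bestRotation (A : List Int) : Prop := A ≠ []
instance (A : List Int) : Decidable (Pre_bestRotation A) := by unfold Pre_bestRotation; infer_instance
def pvWitness_bestRotation : List Int := ([1, 3, 0, 2, 4])

def Spec_bestRotation (A : List Int) (out : Int) : Prop := out = bestRotation_alt A
instance (A : List Int) (out : Int) : Decidable (Spec_bestRotation A out) := by unfold Spec_bestRotation; infer_instance

-- ===== CLAIM (what is proved, stated in full; the proofs are below) =====
def Claim_equal_bestRotation : Prop := ∀ (A : List Int), Dom_bestRotation A → Pre_bestRotation A → Spec_bestRotation A (bestRotation A)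

-- ===== LEMMAS AND PROOFS =====

theorem mod_shift (x : Int) (n : Int) (hn : 0 < n) :
    PySem.Int.mod (x + n) n = PySem.Int.mod x n := by
  rw [PySem.Int.mod_eq_emod_of_pos hn, PySem.Int.mod_eq_emod_of_pos hn,
      show x + n = x + n * 1 by ring, Int.add_mul_emod_self_left]

theorem dec_foldl (L : List Int) (ch : List Int)
    (hL : ∀ x ∈ L, 0 ≤ x ∧ x < (ch.length : Int)) :
    (L.foldl (fun c i => PySem.List.pySetD c i (PySem.List.pyGetD c i 0 - 1)) ch).length = ch.length ∧
    ∀ j : Nat,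
      (L.foldl (fun c i => PySem.List.pySetD c i (PySem.List.pyGetD c i 0 - 1)) ch).getD j 0 =
        ch.getD j 0 - (if j < ch.length then (L.count (j : Int) : Int) else 0) := by
  induction L generalizing ch with
  | nil => exact ⟨rfl, fun j => by simp⟩
  | cons x L ih =>
    obtain ⟨hx0, hxlt⟩ := hL x (by simp)
    set ch' := PySem.List.pySetD ch x (PySem.List.pyGetD ch x 0 - 1) with hch'
    have hset : ch'.length = ch.length := by
      rw [hch', PySem.List.pySetD_of_nonneg ch _ hx0]; simp
    obtain ⟨hlen, hget⟩ := ih ch'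
      (fun y hy => by have := hL y (List.mem_cons_of_mem _ hy); rw [hset]; exact this)
    refine ⟨by simpa [hset] using hlen, fun j => ?_⟩
    simp only [List.foldl_cons]
    rw [← hch', hget j, hset]
    rw [hch', PySem.List.pySetD_of_nonneg ch _ hx0,
        PySem.List.pyGetD_eq_getElem ch 0 hx0 hxlt]
    by_cases hj : j < ch.length
    · rw [List.getD_eq_getElem _ _ (by simpa using hj), List.getD_eq_getElem _ _ hj]
      rw [List.getElem_set]
      rw [List.count_cons]
      by_cases hxe : x.toNat = j
      · have hbeq : (x == ((j : Nat) : Int)) = true := by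
          simp only [beq_iff_eq]; omega
        simp only [if_pos hj, hxe, hbeq, if_true]
        push_cast; ring
      · have hbeq : (x == ((j : Nat) : Int)) = false := by
          simp only [beq_eq_false_iff_ne, ne_eq]; omega
        simp [hxe, hbeq, hj]
    · have hj2 : ¬ j < ch.length := hj
      rw [List.getD_eq_default _ _ (by simpa using hj2), List.getD_eq_default _ _ (by omega)]
      simp [hj2]

def prefixSum (ch : List Int) (j : Nat) : Int :=
  ((List.range (j+1)).map (fun m => ch.getD m 0)).sum

theorem prefix_foldl (ch : List Int) (t : Nat) (ht : t ≤ ch.length) :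
    ((PySem.List.pyRange 1 (t : Int) 1).foldl
      (fun c i => PySem.List.pySetD c i
        (PySem.List.pyGetD c i 0 + (PySem.List.pyGetD c (i - 1) 0 + 1))) ch).length = ch.length ∧
    ∀ j : Nat, j < ch.length →
      ((PySem.List.pyRange 1 (t : Int) 1).foldl
        (fun c i => PySem.List.pySetD c i
          (PySem.List.pyGetD c i 0 + (PySem.List.pyGetD c (i - 1) 0 + 1))) ch).getD j 0 =
        if j < t then (j : Int) + prefixSum ch j else ch.getD j 0 := by
  induction t with
  | zero =>
    rw [PySem.List.pyRange_one_eq_nil (by norm_num)]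
    exact ⟨rfl, fun j hj => by simp⟩
  | succ t ih =>
    by_cases ht0 : t = 0
    · subst ht0
      rw [show ((1:Nat) : Int) = 0 + 1 by norm_num, PySem.List.pyRange_one_eq_nil (by norm_num)]
      refine ⟨rfl, fun j hj => ?_⟩
      by_cases hj0 : j < 1
      · have : j = 0 := by omega
        subst this
        simp [prefixSum]
      · simp [hj0]
    · obtain ⟨hlen, hget⟩ := ih (by omega)
      have hsplit : PySem.List.pyRange 1 ((t:Int) + 1) 1 =
          PySem.List.pyRange 1 (t : Int) 1 ++ [(t : Int)] :=
        PySem.List.pyRange_one_succ_right (by omega)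
      rw [show (((t+1 : Nat)) : Int) = (t : Int) + 1 by push_cast; ring, hsplit, List.foldl_append]
      set r := (PySem.List.pyRange 1 (t : Int) 1).foldl
        (fun c i => PySem.List.pySetD c i
          (PySem.List.pyGetD c i 0 + (PySem.List.pyGetD c (i - 1) 0 + 1))) ch with hr
      simp only [List.foldl_cons, List.foldl_nil]
      have htlt : t < ch.length := by omega
      have hget_t : PySem.List.pyGetD r (t : Int) 0 = ch.getD t 0 := by
        rw [PySem.List.pyGetD_eq_getElem r 0 (by positivity) (by rw [hlen]; exact_mod_cast htlt)]
        simp only [Int.toNat_natCast]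
        rw [← List.getD_eq_getElem _ _ (by omega), hget t htlt]
        simp
      have hget_t1 : PySem.List.pyGetD r ((t : Int) - 1) 0 = ((t-1 : Nat) : Int) + prefixSum ch (t-1) := by
        have hc : (t:Int) - 1 = ((t-1 : Nat) : Int) := by omega
        rw [hc, PySem.List.pyGetD_eq_getElem r 0 (by positivity) (by rw [hlen]; omega)]
        simp only [Int.toNat_natCast]
        rw [← List.getD_eq_getElem _ _ (by rw [hlen]; omega), hget (t-1) (by omega)]
        rw [if_pos (by omega)]
      rw [PySem.List.pySetD_of_nonneg r _ (by positivity)]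
      refine ⟨by rw [List.length_set]; exact hlen, fun j hj => ?_⟩
      rw [hget_t, hget_t1]
      rw [List.getD_eq_getElem _ _ (by rw [List.length_set, hlen]; exact hj)]
      rw [List.getElem_set]
      by_cases hjt : j = t
      · subst hjt
        rw [if_pos (by omega), if_pos (by omega)]
        have hps : prefixSum ch j = prefixSum ch (j-1) + ch.getD j 0 := by
          unfold prefixSum
          rw [show j + 1 = (j-1+1) + 1 by omega, List.range_succ, List.map_append, List.sum_append]
          simp [show j - 1 + 1 = j by omega]
        rw [hps]; omega
      · rw [if_neg (by omega), ← List.getD_eq_getElem _ _ (by rw [hlen]; exact hj), hget j hj]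
        by_cases hjlt : j < t
        · rw [if_pos hjlt, if_pos (by omega)]
        · rw [if_neg hjlt, if_neg (by omega)]

theorem indicator_sum (p : Int) (hp : 0 ≤ p) (j : Nat) :
    ((List.range (j+1)).map (fun m => if (p == ((m : Nat) : Int)) then (1:Int) else 0)).sum =
      if p ≤ (j : Int) then 1 else 0 := by
  induction j with
  | zero =>
    simp only [List.range_succ, List.range_zero, List.nil_append, List.map_cons, List.map_nil,
      List.sum_cons, List.sum_nil, Nat.cast_zero, add_zero]
    by_cases h : p = 0
    · simp [h]
    · rw [if_neg (by simpa using h), if_neg (by omega)]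
  | succ j ih =>
    rw [List.range_succ, List.map_append, List.sum_append, ih]
    simp only [List.map_cons, List.map_nil, List.sum_cons, List.sum_nil, add_zero]
    by_cases h1 : p ≤ (j : Int)
    · rw [if_pos h1, if_neg (by simp; omega), if_pos (by omega)]; ring
    · rw [if_neg h1]
      by_cases h2 : p = ((j:Nat) : Int) + 1
      · rw [if_pos (by simp; omega), if_pos (by omega)]; ring
      · rw [if_neg (by simp; omega), if_neg (by omega)]; ring

theorem sum_neg_count (pts : List Int) (hp : ∀ p ∈ pts, 0 ≤ p) (j : Nat) :
    ((List.range (j+1)).map (fun m => -((pts.count ((m : Nat) : Int)) : Int))).sum =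
      -(pts.countP (fun p => decide (p ≤ (j : Int))) : Int) := by
  induction pts with
  | nil => simp
  | cons p pts ih =>
    have hp0 : 0 ≤ p := hp p (by simp)
    have ihh := ih (fun q hq => hp q (by simp [hq]))
    have hcount : ∀ m : Nat, ((p :: pts).count ((m:Nat):Int) : Int) =
        (pts.count ((m:Nat):Int) : Int) + (if (p == ((m:Nat):Int)) then (1:Int) else 0) := by
      intro m; rw [List.count_cons]; by_cases h : p == ((m:Nat):Int) <;> simp [h]
    calc ((List.range (j+1)).map (fun m => -(((p :: pts).count ((m : Nat) : Int)) : Int))).sum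
        = ((List.range (j+1)).map (fun m =>
            -((pts.count ((m : Nat) : Int)) : Int) + -(if (p == ((m:Nat):Int)) then (1:Int) else 0))).sum := by
          refine congrArg List.sum (List.map_congr_left (fun m _ => ?_))
          rw [hcount m]; ring
      _ = ((List.range (j+1)).map (fun m => -((pts.count ((m : Nat) : Int)) : Int))).sum +
          ((List.range (j+1)).map (fun m => -(if (p == ((m:Nat):Int)) then (1:Int) else 0))).sum := by
          rw [← List.sum_map_add]
      _ = -(pts.countP (fun p => decide (p ≤ (j : Int))) : Int) - (if p ≤ (j:Int) then 1 else 0) := by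
          rw [ihh]
          have : ((List.range (j+1)).map (fun m => -(if (p == ((m:Nat):Int)) then (1:Int) else 0))).sum =
              -(((List.range (j+1)).map (fun m => if (p == ((m:Nat):Int)) then (1:Int) else 0)).sum) := by
            induction (List.range (j+1)) with
            | nil => simp
            | cons a l ihl => simp only [List.map_cons, List.sum_cons, ihl]; ring
          rw [this, indicator_sum p hp0 j]; ring
      _ = -(((p :: pts).countP (fun p => decide (p ≤ (j : Int)))) : Int) := by
          rw [List.countP_cons]
          by_cases h : p ≤ (j:Int) <;> simp [h]
          ring

-- the common "scores.index(max(scores))" tail of both ports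
def pickIdx (L : List Int) : Int :=
  match PySem.List.max? L (fun x => x) with
  | none => 0
  | some m =>
    match PySem.List.index? L m with
    | some j => (j : Int)
    | none => 0

def ptsOf (A : List Int) : List Int :=
  (PySem.List.pyRange 0 (A.length : Int) 1).map
    (fun i => PySem.Int.mod (i - PySem.List.pyGetD A i 0 + 1) (A.length : Int))

def chFinal (A : List Int) : List Int :=
  (PySem.List.pyRange 1 (A.length : Int) 1).foldl
    (fun ch i => PySem.List.pySetD ch i (PySem.List.pyGetD ch i 0 + (PySem.List.pyGetD ch (i - 1) 0 + 1)))
    ((PySem.List.pyRange 0 (A.length : Int) 1).foldl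
      (fun ch i =>
        PySem.List.pySetD ch (PySem.Int.mod (i - PySem.List.pyGetD A i 0 + 1 + (A.length : Int)) (A.length : Int))
          (PySem.List.pyGetD ch (PySem.Int.mod (i - PySem.List.pyGetD A i 0 + 1 + (A.length : Int)) (A.length : Int)) 0 - 1))
      (List.replicate A.length 0))

def sortedPts (A : List Int) : List Int :=
  PySem.List.sorted (ptsOf A) (fun x => x) false

def loopState (A : List Int) : List Int × Nat :=
  (PySem.List.pyRange 0 (A.length : Int) 1).foldl
    (fun st k =>
      let ptr' := advancePtr (sortedPts A) k st.2
      (st.1 ++ [k - (ptr' : Int)], ptr'))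
    ([], 0)

theorem bestRotation_eq_pick (A : List Int) : bestRotation A = pickIdx (chFinal A) := rfl
theorem alt_eq_pick (A : List Int) : bestRotation_alt A = pickIdx (loopState A).1 := rfl

-- in a sorted nonnegative list, the elements ≤ k form exactly the prefix of length countP (≤ k)
theorem sorted_prefix_iff (pts : List Int) (hs : pts.Pairwise (· ≤ ·)) (k : Int) :
    ∀ i (h : i < pts.length), (pts[i] ≤ k ↔ i < pts.countP (fun p => decide (p ≤ k))) := by
  induction pts with
  | nil => intro i h; simp at h
  | cons x pts ih =>
    have hs' := (List.pairwise_cons.mp hs).2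
    have hx := (List.pairwise_cons.mp hs).1
    intro i h
    rw [List.countP_cons]
    by_cases hxk : x ≤ k
    · rw [if_pos (by simpa using hxk)]
      cases i with
      | zero => simp [hxk]
      | succ i =>
        simp only [List.getElem_cons_succ]
        rw [ih hs' i (by simpa using h)]
        omega
    · rw [if_neg (by simpa using hxk)]
      have hall : pts.countP (fun p => decide (p ≤ k)) = 0 := by
        rw [List.countP_eq_zero]
        intro p hp
        have := hx p hp
        simp only [decide_eq_true_eq]
        omega
      cases i with
      | zero => simp [hxk, hall]
      | succ i =>
        simp only [List.getElem_cons_succ, hall]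
        constructor
        · intro hc
          exact absurd (le_trans (hx _ (List.getElem_mem _)) hc) hxk
        · omega

theorem advance_eq_aux (pts : List Int) (k : Int) (m : Nat) (hm : m ≤ pts.length)
    (hiff : ∀ i (h : i < pts.length), (pts[i] ≤ k ↔ i < m)) :
    ∀ d ptr, ptr + d = m → advancePtr pts k ptr = m := by
  intro d
  induction d with
  | zero =>
    intro ptr hptr
    have hp : ptr = m := by omega
    subst hp
    unfold advancePtr
    by_cases h : ptr < pts.length
    · rw [dif_pos h, if_neg (by rw [hiff ptr h]; omega)]
    · rw [dif_neg h]
  | succ d ih =>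
    intro ptr hptr
    have h : ptr < pts.length := by omega
    unfold advancePtr
    rw [dif_pos h, if_pos (by rw [hiff ptr h]; omega)]
    exact ih (ptr + 1) (by omega)

theorem advance_eq (pts : List Int) (k : Int) (hs : pts.Pairwise (· ≤ ·)) (ptr : Nat)
    (hptr : ptr ≤ pts.countP (fun p => decide (p ≤ k))) :
    advancePtr pts k ptr = pts.countP (fun p => decide (p ≤ k)) :=
  advance_eq_aux pts k (pts.countP (fun p => decide (p ≤ k))) List.countP_le_length
    (sorted_prefix_iff pts hs k) (pts.countP (fun p => decide (p ≤ k)) - ptr) ptr (by omega)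

theorem loop_spec (pts : List Int) (hs : pts.Pairwise (· ≤ ·)) (hp0 : ∀ p ∈ pts, 0 ≤ p) (t : Nat) :
    (PySem.List.pyRange 0 (t : Int) 1).foldl
      (fun st k =>
        let ptr' := advancePtr pts k st.2
        (st.1 ++ [k - (ptr' : Int)], ptr'))
      (([] : List Int), (0 : Nat)) =
    ((List.range t).map (fun k : Nat => (k : Int) - (pts.countP (fun p => decide (p ≤ (k : Int))) : Int)),
      pts.countP (fun p => decide (p ≤ (t : Int) - 1))) := by
  induction t with
  | zero =>
    rw [PySem.List.pyRange_one_eq_nil (by norm_num)]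
    simp only [List.foldl_nil, List.range_zero, List.map_nil, Nat.cast_zero]
    have : pts.countP (fun p => decide (p ≤ (0 : Int) - 1)) = 0 := by
      rw [List.countP_eq_zero]
      intro p hp
      have := hp0 p hp
      simp only [decide_eq_true_eq]
      omega
    rw [this]
  | succ t ih =>
    rw [show (((t + 1 : Nat)) : Int) = (t : Int) + 1 by push_cast; ring,
        PySem.List.pyRange_one_succ_right (by positivity), List.foldl_append, ih]
    simp only [List.foldl_cons, List.foldl_nil]
    have hmono : pts.countP (fun p => decide (p ≤ (t : Int) - 1)) ≤
        pts.countP (fun p => decide (p ≤ (t : Int))) := by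
      refine List.countP_mono_left (fun p _ => ?_)
      simp only [decide_eq_true_eq]
      omega
    rw [advance_eq pts _ hs _ hmono]
    rw [List.range_succ, List.map_append]
    simp only [List.map_cons, List.map_nil]
    rw [show (t : Int) + 1 - 1 = (t : Int) by ring]

theorem chFinal_spec (A : List Int) (h : A ≠ []) :
    (chFinal A).length = A.length ∧
    ∀ k : Nat, k < A.length → (chFinal A).getD k 0 =
      (k : Int) - ((ptsOf A).countP (fun p => decide (p ≤ (k : Int))) : Int) := by
  have hn : 0 < A.length := List.length_pos_iff.mpr h
  have hnI : (0 : Int) < (A.length : Int) := by exact_mod_cast hn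
  set n := A.length with hdefn
  set ptsA : List Int := (PySem.List.pyRange 0 (n : Int) 1).map
      (fun i => PySem.Int.mod (i - PySem.List.pyGetD A i 0 + 1 + (n : Int)) (n : Int)) with hptsA
  have hpts : ptsA = ptsOf A := by
    refine List.map_congr_left (fun i _ => ?_)
    exact mod_shift _ _ hnI
  have h1 : (PySem.List.pyRange 0 (n : Int) 1).foldl
      (fun ch i =>
        PySem.List.pySetD ch (PySem.Int.mod (i - PySem.List.pyGetD A i 0 + 1 + (n : Int)) (n : Int))
          (PySem.List.pyGetD ch (PySem.Int.mod (i - PySem.List.pyGetD A i 0 + 1 + (n : Int)) (n : Int)) 0 - 1))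
      (List.replicate n (0:Int)) =
      ptsA.foldl (fun c x => PySem.List.pySetD c x (PySem.List.pyGetD c x 0 - 1))
        (List.replicate n (0:Int)) := (List.foldl_map
        (f := fun i => PySem.Int.mod (i - PySem.List.pyGetD A i 0 + 1 + (n:Int)) (n:Int))
        (g := fun c x => PySem.List.pySetD c x (PySem.List.pyGetD c x 0 - 1))
        (l := PySem.List.pyRange 0 (n:Int) 1)
        (init := List.replicate n (0:Int))).symm
  set ch1 := ptsA.foldl (fun c x => PySem.List.pySetD c x (PySem.List.pyGetD c x 0 - 1))
      (List.replicate n (0:Int)) with hch1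
  have hbound : ∀ x ∈ ptsA, 0 ≤ x ∧ x < ((List.replicate n (0:Int)).length : Int) := by
    intro x hx
    rw [hptsA] at hx
    obtain ⟨i, _, rfl⟩ := List.mem_map.mp hx
    rw [List.length_replicate]
    exact ⟨PySem.Int.mod_nonneg _ hnI, PySem.Int.mod_lt _ hnI⟩
  obtain ⟨hlen1, hget1⟩ := dec_foldl ptsA (List.replicate n (0:Int)) hbound
  rw [← hch1] at hlen1 hget1
  rw [List.length_replicate] at hlen1
  have hget1' : ∀ j : Nat, j < n → ch1.getD j 0 = -((ptsA.count ((j:Nat):Int)) : Int) := by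
    intro j hj
    rw [hget1 j, List.length_replicate, if_pos hj, List.getD_replicate]
    · ring
    · omega
  have hp0 : ∀ p ∈ ptsA, 0 ≤ p := fun p hp => (hbound p hp).1
  obtain ⟨hlen2, hget2⟩ := prefix_foldl ch1 n (by omega)
  have hchF : chFinal A = (PySem.List.pyRange 1 (n : Int) 1).foldl
      (fun c i => PySem.List.pySetD c i
        (PySem.List.pyGetD c i 0 + (PySem.List.pyGetD c (i - 1) 0 + 1))) ch1 := by
    rw [chFinal, ← hdefn, h1]
  refine ⟨by rw [hchF, hlen2, hlen1], fun k hk => ?_⟩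
  rw [hchF, hget2 k (by omega), if_pos (by omega)]
  have hps : prefixSum ch1 k = -(ptsA.countP (fun p => decide (p ≤ (k : Int))) : Int) := by
    rw [prefixSum, ← sum_neg_count ptsA hp0 k]
    refine congrArg List.sum (List.map_congr_left (fun m hm => ?_))
    have hm' : m < n := by have := List.mem_range.mp hm; omega
    rw [hget1' m hm']
  rw [hps, hpts]; ring

theorem lists_eq (A : List Int) (h : A ≠ []) : chFinal A = (loopState A).1 := by
  have hn : 0 < A.length := List.length_pos_iff.mpr h
  have hnI : (0 : Int) < (A.length : Int) := by exact_mod_cast hn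
  set n := A.length with hdefn
  have hp0' : ∀ p ∈ ptsOf A, 0 ≤ p := by
    intro p hp
    obtain ⟨i, _, rfl⟩ := List.mem_map.mp hp
    exact PySem.Int.mod_nonneg _ hnI
  have hperm : (sortedPts A).Perm (ptsOf A) := PySem.List.sorted_perm _ _ _
  have hsorted : (sortedPts A).Pairwise (· ≤ ·) := by
    have := PySem.List.sorted_pairwise (ptsOf A) (fun x => x)
    simpa using this
  have hp0 : ∀ p ∈ sortedPts A, 0 ≤ p := fun p hp => hp0' p (hperm.mem_iff.mp hp)
  have hcnt : ∀ k : Int, (sortedPts A).countP (fun p => decide (p ≤ k)) =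
      (ptsOf A).countP (fun p => decide (p ≤ k)) := fun k => hperm.countP_eq _
  have hloop : (loopState A).1 =
      (List.range n).map (fun k : Nat => (k : Int) - ((ptsOf A).countP (fun p => decide (p ≤ (k : Int))) : Int)) := by
    rw [loopState, ← hdefn, loop_spec (sortedPts A) hsorted hp0 n]
    refine List.map_congr_left (fun k _ => ?_)
    rw [hcnt]
  rw [hloop]
  refine List.ext_getElem (by rw [(chFinal_spec A h).1, List.length_map, List.length_range]) (fun k hk1 hk2 => ?_)
  rw [List.getElem_map, List.getElem_range]
  have hk : k < n := by rwa [(chFinal_spec A h).1] at hk1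
  rw [← List.getD_eq_getElem _ _ hk1, (chFinal_spec A h).2 k hk]

-- ===== VERDICT (by name: the statement is the Claim_ definition above) =====
theorem bestRotation_spec : Claim_equal_bestRotation := by
  intro A _ hPre
  unfold Spec_bestRotation
  rw [bestRotation_eq_pick, alt_eq_pick, lists_eq A hPre]
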